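-- pv_equiv track=rewrite | github.com/WannaLearning/Evolutions-of-Semantic-Consistency-in-Research-Topic-via-Contextualized-Word-Embedding | Code/ExprimentsAndResults.py | get_cc_num
-- ===== SOURCE A (Python) =====
-- def get_cc_num(ccs, time1, time2):
--     # 引用次数
--     cc_full_num = 0
--     cc_frac_num = 0
--     for year in range(time1, time2 + 1):
--         if year in ccs:
--             cc_full_num += ccs[year][0]
--             cc_frac_num += ccs[year][1]
--     return cc_full_num, cc_frac_num
-- ===== SOURCE B (Python) =====
-- def get_cc_num(ccs, time1, time2):
--     # staged passes: select the in-range entries once, then sum each component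
--     vals = [v for y, v in ccs.items() if time1 <= y <= time2]
--     return sum(v[0] for v in vals), sum(v[1] for v in vals)
-- ===== Notes on version B (the rewrite author's own statement) =====
-- stated objective: alternative
-- what changed: B replaces A's fold over every integer year in [time1, time2] (with a dict membership test and lookup per year) by staged passes driven by the data: it filters the dict's items by a range test once, then sums the two components of the selected values separately. The Lean Pre_ requires distinct keys, which a Python dict guarantees.
import Mathlib
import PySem

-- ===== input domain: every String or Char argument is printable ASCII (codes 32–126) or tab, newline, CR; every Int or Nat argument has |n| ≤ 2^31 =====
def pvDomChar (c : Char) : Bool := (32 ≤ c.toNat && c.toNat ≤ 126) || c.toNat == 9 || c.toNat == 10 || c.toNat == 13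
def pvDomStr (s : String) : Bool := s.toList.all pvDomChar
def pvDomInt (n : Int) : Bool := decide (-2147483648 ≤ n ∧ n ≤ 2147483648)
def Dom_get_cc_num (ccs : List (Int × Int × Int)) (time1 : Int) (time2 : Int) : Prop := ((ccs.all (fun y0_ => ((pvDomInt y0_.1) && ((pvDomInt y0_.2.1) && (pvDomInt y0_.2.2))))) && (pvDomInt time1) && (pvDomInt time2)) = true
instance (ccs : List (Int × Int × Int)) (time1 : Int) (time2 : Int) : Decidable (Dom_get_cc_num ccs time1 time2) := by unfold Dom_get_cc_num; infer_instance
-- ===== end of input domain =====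

-- B replaces A's fold over every integer year in [time1, time2] (membership test + lookup
-- per year) by staged passes over the dict's items: filter by a range test, then sum each
-- component of the selected values separately.

-- ===== PORT A =====
-- 'year in ccs' / 'ccs[year]' on the association list = first match (a Python dict has unique keys)
def get_cc_num (ccs : List (Int × Int × Int)) (time1 : Int) (time2 : Int) : Int × Int :=
  (PySem.List.pyRange time1 (time2 + 1) 1).foldl
    (fun acc year =>
      match ccs.find? (fun e => e.1 == year) with
      | some e => (acc.1 + e.2.1, acc.2 + e.2.2)
      | none => acc)
    (0, 0)

-- ===== PORT B =====
def get_cc_num_alt (ccs : List (Int × Int × Int)) (time1 : Int) (time2 : Int) : Int × Int :=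
  let vals := (ccs.filter (fun e => time1 ≤ e.1 && e.1 ≤ time2)).map Prod.snd
  ((vals.map Prod.fst).sum, (vals.map Prod.snd).sum)

-- ===== PRECONDITION & SPEC =====
-- Pre_ requires distinct keys: the Python argument is a dict, whose keys are necessarily
-- distinct; on an association list with duplicate keys the two traversals would differ.
def Pre_get_cc_num (ccs : List (Int × Int × Int)) (time1 : Int) (time2 : Int) : Prop :=
  (ccs.map Prod.fst).Nodup
instance (ccs : List (Int × Int × Int)) (time1 : Int) (time2 : Int) : Decidable (Pre_get_cc_num ccs time1 time2) := by unfold Pre_get_cc_num; infer_instance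

def pvWitness_get_cc_num : (List (Int × Int × Int)) × Int × Int :=
  ([(2001, 3, 1), (2003, 2, 5), (1999, 4, 4)], 2000, 2003)

def Spec_get_cc_num (ccs : List (Int × Int × Int)) (time1 : Int) (time2 : Int) (out : Int × Int) : Prop := out = get_cc_num_alt ccs time1 time2
instance (ccs : List (Int × Int × Int)) (time1 : Int) (time2 : Int) (out : Int × Int) : Decidable (Spec_get_cc_num ccs time1 time2 out) := by unfold Spec_get_cc_num; infer_instance

-- ===== CLAIM (what is proved, stated in full; the proofs are below) =====
def Claim_equal_get_cc_num : Prop := ∀ (ccs : List (Int × Int × Int)) (time1 : Int) (time2 : Int), Dom_get_cc_num ccs time1 time2 → Pre_get_cc_num ccs time1 time2 → Spec_get_cc_num ccs time1 time2 (get_cc_num ccs time1 time2)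

-- ===== LEMMAS AND PROOFS =====

-- the value A adds for a given year (0 if the year is absent)
def pvLk (ccs : List (Int × Int × Int)) (y : Int) : Int × Int :=
  match ccs.find? (fun e => e.1 == y) with
  | some e => (e.2.1, e.2.2)
  | none => (0, 0)

lemma pvFoldA (ccs : List (Int × Int × Int)) (R : List Int) (a : Int × Int) :
    R.foldl
      (fun acc year =>
        match ccs.find? (fun e => e.1 == year) with
        | some e => (acc.1 + e.2.1, acc.2 + e.2.2)
        | none => acc)
      a = a + (R.map (pvLk ccs)).sum := by
  induction R generalizing a with
  | nil => simp
  | cons y R ih =>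
      simp only [List.foldl_cons, List.map_cons, List.sum_cons, ih]
      unfold pvLk
      cases h : ccs.find? (fun e => e.1 == y) with
      | none => simp
      | some e => simp [Prod.ext_iff]; constructor <;> ring

-- summing 'if y = k then v else g y' over a duplicate-free list picks v at most once
lemma pvSplit (k : Int) (v : Int × Int) (g : Int → Int × Int) (R : List Int) (hR : R.Nodup) :
    (R.map (fun y => if y = k then v else g y)).sum
      = (if k ∈ R then v - g k else 0) + (R.map g).sum := by
  induction R with
  | nil => simp
  | cons a R ih =>
      rcases List.nodup_cons.mp hR with ⟨ha, hR'⟩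
      simp only [List.map_cons, List.sum_cons, ih hR', List.mem_cons]
      by_cases hak : a = k
      · subst hak
        simp [ha]
        abel
      · simp [hak, Ne.symm hak]
        split <;> abel

-- the range-driven sum of lookups equals the item-driven filtered sum, given distinct keys
lemma pvCore (ccs : List (Int × Int × Int)) (R : List Int) (hR : R.Nodup)
    (hk : (ccs.map Prod.fst).Nodup) :
    (R.map (pvLk ccs)).sum
      = (ccs.map (fun e => if e.1 ∈ R then ((e.2.1, e.2.2) : Int × Int) else 0)).sum := by
  induction ccs with
  | nil =>
      simp only [List.map_nil, List.sum_nil]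
      apply List.sum_eq_zero
      intro x hx
      rcases List.mem_map.mp hx with ⟨y, _, rfl⟩
      simp [pvLk]
  | cons e rest ih =>
      rcases List.nodup_cons.mp hk with ⟨_, hk'⟩
      have hlk : ∀ y, pvLk (e :: rest) y
          = if y = e.1 then (e.2.1, e.2.2) else pvLk rest y := by
        intro y
        unfold pvLk
        simp only [List.find?_cons]
        by_cases h : y = e.1
        · simp [h]
        · have : (e.1 == y) = false := by simp [Ne.symm h]
          simp [this, h]
      calc (R.map (pvLk (e :: rest))).sum
          = (R.map (fun y => if y = e.1 then (e.2.1, e.2.2) else pvLk rest y)).sum := by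
            exact congrArg List.sum (List.map_congr_left (fun y _ => hlk y))
        _ = (if e.1 ∈ R then ((e.2.1, e.2.2) : Int × Int) - pvLk rest e.1 else 0)
              + (R.map (pvLk rest)).sum :=
            pvSplit e.1 (e.2.1, e.2.2) (pvLk rest) R hR
        _ = (if e.1 ∈ R then ((e.2.1, e.2.2) : Int × Int) else 0) + (R.map (pvLk rest)).sum := by
            have hn : rest.find? (fun x => x.1 == e.1) = none := by
              apply List.find?_eq_none.mpr
              intro x hx
              simp only [beq_iff_eq]
              intro hxe
              exact absurd (List.mem_map.mpr ⟨x, hx, hxe⟩) (List.nodup_cons.mp hk).1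
            have h0 : pvLk rest e.1 = 0 := by unfold pvLk; rw [hn]; rfl
            rw [h0, sub_zero]
        _ = (if e.1 ∈ R then ((e.2.1, e.2.2) : Int × Int) else 0)
              + (rest.map (fun e => if e.1 ∈ R then ((e.2.1, e.2.2) : Int × Int) else 0)).sum := by
            rw [ih hk']
        _ = ((e :: rest).map (fun e => if e.1 ∈ R then ((e.2.1, e.2.2) : Int × Int) else 0)).sum := by
            simp

-- B's staged componentwise sums over the filtered items equal the single if-guarded pair sum
lemma pvB (p : Int × Int × Int → Bool) (l : List (Int × Int × Int)) :
    ((((l.filter p).map Prod.snd).map Prod.fst).sum,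
      (((l.filter p).map Prod.snd).map Prod.snd).sum)
      = (l.map (fun e => if p e then ((e.2.1, e.2.2) : Int × Int) else 0)).sum := by
  induction l with
  | nil => simp
  | cons e l ih =>
      by_cases h : p e
      · simp only [List.filter_cons, h, if_pos, List.map_cons, List.sum_cons, Prod.ext_iff] at *
        simp [← ih.1, ← ih.2]
      · simp only [List.filter_cons, h, List.map_cons, List.sum_cons] at *
        simpa [h] using ih

-- ===== VERDICT (by name: the statement is the Claim_ definition above) =====
theorem get_cc_num_spec : Claim_equal_get_cc_num := by
  intro ccs time1 time2 _ hpre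
  unfold Spec_get_cc_num get_cc_num get_cc_num_alt
  rw [pvFoldA,
      pvCore ccs _ (PySem.List.nodup_pyRange_one time1 (time2 + 1)) hpre]
  rw [show ((0,0):Int×Int) = 0 from rfl, zero_add]
  rw [pvB (fun e => time1 ≤ e.1 && e.1 ≤ time2) ccs]
  apply congrArg List.sum
  apply List.map_congr_left
  intro e _
  have : e.1 ∈ PySem.List.pyRange time1 (time2 + 1) 1 ↔ time1 ≤ e.1 ∧ e.1 ≤ time2 := by
    rw [PySem.List.mem_pyRange_one]
    omega
  simp only [this, Bool.and_eq_true, decide_eq_true_eq]
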